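-- pv_equiv track=rewrite | github.com/Ace1928/eidosian_forge | archive_forge/src/archive_forge/func__diff_poly.py | _diff_poly
-- ===== SOURCE A (Python) =====
-- def _diff_poly(root, coefficients, p):
--     """A helper function used by polynomial_congruence.
--     It returns the derivative of the polynomial evaluated at the
--     root (mod p).
--
--     Parameters
--     ==========
--
--     coefficients : list of integers
--     p : prime number
--     root : integer
--     """
--     diff = 0
--     rank = len(coefficients)
--     for coeff in range(0, rank - 1):
--         if not coefficients[coeff]:
--             continue
--         diff = (diff + pow(root, rank - coeff - 2, p) * (rank - coeff - 1) * coefficients[coeff]) % p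
--     return diff % p
-- ===== SOURCE B (Python) =====
-- def _diff_poly(root, coefficients, p):
--     """Evaluate the derivative of the polynomial at root (mod p) by
--     Horner's rule: one pass, no per-term modular exponentiation."""
--     d = 0
--     k = len(coefficients) - 1
--     for c in coefficients[:-1]:
--         d = (d * root + k * c) % p
--         k -= 1
--     return d % p
-- ===== Notes on version B (the rewrite author's own statement) =====
-- stated objective: faster
-- what changed: Replaced the per-term modular exponentiation pow(root, rank-coeff-2, p) with a single Horner pass over the derivative's coefficients, one multiply-add mod p per term.
import Mathlib
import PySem

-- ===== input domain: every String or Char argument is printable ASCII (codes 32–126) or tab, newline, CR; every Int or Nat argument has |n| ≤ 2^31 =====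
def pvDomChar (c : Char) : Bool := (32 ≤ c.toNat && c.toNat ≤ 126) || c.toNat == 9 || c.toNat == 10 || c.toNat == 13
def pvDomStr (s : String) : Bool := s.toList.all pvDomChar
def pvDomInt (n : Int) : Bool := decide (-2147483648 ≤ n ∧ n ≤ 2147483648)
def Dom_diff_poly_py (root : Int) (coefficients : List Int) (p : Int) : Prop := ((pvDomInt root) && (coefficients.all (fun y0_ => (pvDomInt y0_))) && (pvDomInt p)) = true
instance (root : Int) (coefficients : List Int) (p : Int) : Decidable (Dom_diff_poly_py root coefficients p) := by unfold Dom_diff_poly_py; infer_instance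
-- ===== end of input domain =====

-- B replaces A's per-term pow(root, e, p) with a single Horner pass over the derivative's
-- coefficients (objective: faster, one multiplication per term instead of a modular exponentiation).

-- ===== PORT A =====
-- The exponent rank - coeff - 2 is ≥ 0 for every coeff the loop visits (0 ≤ coeff ≤ rank - 2),
-- so .toNat is exact there; likewise the index coeff is always in range, so pyGetD is exact.
def diff_poly_py (root : Int) (coefficients : List Int) (p : Int) : Int :=
  let rank : Int := coefficients.length
  let diff : Int :=
    (PySem.List.pyRange 0 (rank - 1) 1).foldl
      (fun diff coeff =>
        if PySem.List.pyGetD coefficients coeff 0 = 0 then diff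
        else
          PySem.Int.mod
            (diff +
              PySem.Int.powMod root (rank - coeff - 2).toNat p * (rank - coeff - 1) *
                PySem.List.pyGetD coefficients coeff 0) p)
      0
  PySem.Int.mod diff p

-- ===== PORT B =====
def diff_poly_py_alt (root : Int) (coefficients : List Int) (p : Int) : Int :=
  let s :=
    (PySem.List.slice coefficients none (some (-1))).foldl
      (fun (s : Int × Int) c => (PySem.Int.mod (s.1 * root + s.2 * c) p, s.2 - 1))
      (0, (coefficients.length : Int) - 1)
  PySem.Int.mod s.1 p

-- ===== PRECONDITION & SPEC =====
-- Pre_ excludes only p = 0, where Python's pow(root, e, 0) (and 0 % 0) raises ValueError.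
def Pre_diff_poly_py (root : Int) (coefficients : List Int) (p : Int) : Prop := p ≠ 0
instance (root : Int) (coefficients : List Int) (p : Int) : Decidable (Pre_diff_poly_py root coefficients p) := by unfold Pre_diff_poly_py; infer_instance
def pvWitness_diff_poly_py : Int × List Int × Int := (2, ([3, 1, 4], 5))

def Spec_diff_poly_py (root : Int) (coefficients : List Int) (p : Int) (out : Int) : Prop := out = diff_poly_py_alt root coefficients p
instance (root : Int) (coefficients : List Int) (p : Int) (out : Int) : Decidable (Spec_diff_poly_py root coefficients p out) := by unfold Spec_diff_poly_py; infer_instance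

-- ===== CLAIM (what is proved, stated in full; the proofs are below) =====
def Claim_equal_diff_poly_py : Prop := ∀ (root : Int) (coefficients : List Int) (p : Int), Dom_diff_poly_py root coefficients p → Pre_diff_poly_py root coefficients p → Spec_diff_poly_py root coefficients p (diff_poly_py root coefficients p)

-- ===== LEMMAS AND PROOFS =====

theorem pymod_zero (b : Int) : PySem.Int.mod 0 b = 0 := by
  simp [PySem.Int.mod]

-- Python's mod keeps the residue class.
theorem pymod_emod (a m : Int) : (PySem.Int.mod a m) % m = a % m := by
  have h := PySem.Int.floordiv_mul_add_mod a m
  have h2 : PySem.Int.mod a m = a - PySem.Int.floordiv a m * m := by omega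
  rw [h2]
  exact Int.sub_mul_emod_self_right a (PySem.Int.floordiv a m) m

-- Two integers in the same residue class have the same Python mod (m ≠ 0).
theorem pymod_congr (m a b : Int) (hm : m ≠ 0) (h : a % m = b % m) :
    PySem.Int.mod a m = PySem.Int.mod b m := by
  have ha := PySem.Int.floordiv_mul_add_mod a m
  have hb := PySem.Int.floordiv_mul_add_mod b m
  have hab : m ∣ a - b := Int.ModEq.dvd h.symm
  have hd : m ∣ PySem.Int.mod a m - PySem.Int.mod b m := by
    obtain ⟨t, ht⟩ := hab
    exact ⟨t - PySem.Int.floordiv a m + PySem.Int.floordiv b m, by nlinarith [ht]⟩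
  rcases lt_trichotomy m 0 with hneg | hz | hpos
  · have b1 := PySem.Int.mod_neg_bounds a (b := m) hneg
    have b2 := PySem.Int.mod_neg_bounds b (b := m) hneg
    obtain ⟨t, ht⟩ := hd
    have ht0 : t = 0 := by nlinarith
    rw [ht0, mul_zero] at ht; omega
  · exact absurd hz hm
  · have a1 := PySem.Int.mod_nonneg a hpos
    have a2 := PySem.Int.mod_lt a hpos
    have b1 := PySem.Int.mod_nonneg b hpos
    have b2 := PySem.Int.mod_lt b hpos
    obtain ⟨t, ht⟩ := hd
    have ht0 : t = 0 := by nlinarith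
    rw [ht0, mul_zero] at ht; omega

theorem pymod_idem (a m : Int) (hm : m ≠ 0) :
    PySem.Int.mod (PySem.Int.mod a m) m = PySem.Int.mod a m := by
  exact pymod_congr m _ a hm (pymod_emod a m)

-- A's partial sum: first k terms of the derivative, each with its full power of root.
def pvT (root : Int) (cs : List Int) (k : Nat) : Int :=
  ∑ i ∈ Finset.range k,
    root ^ (cs.length - 2 - i) * ((cs.length : Int) - 1 - (i : Int)) * cs.getD i 0

-- B's partial Horner value after k steps.
def pvH (root : Int) (cs : List Int) (k : Nat) : Int :=
  ∑ i ∈ Finset.range k,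
    root ^ (k - 1 - i) * ((cs.length : Int) - 1 - (i : Int)) * cs.getD i 0

theorem pvH_succ (root : Int) (cs : List Int) (k : Nat) :
    pvH root cs (k + 1) =
      pvH root cs k * root + ((cs.length : Int) - 1 - (k : Int)) * cs.getD k 0 := by
  unfold pvH
  rw [Finset.sum_range_succ]
  have h1 : ∀ i ∈ Finset.range k,
      root ^ (k + 1 - 1 - i) * ((cs.length : Int) - 1 - (i : Int)) * cs.getD i 0 =
        (root ^ (k - 1 - i) * ((cs.length : Int) - 1 - (i : Int)) * cs.getD i 0) * root := by
    intro i hi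
    have hik : i < k := Finset.mem_range.mp hi
    have he : k + 1 - 1 - i = (k - 1 - i) + 1 := by omega
    rw [he, pow_succ]
    ring
  rw [Finset.sum_congr rfl h1, ← Finset.sum_mul]
  simp

theorem pvT_eq_pvH (root : Int) (cs : List Int) :
    pvT root cs (cs.length - 1) = pvH root cs (cs.length - 1) := by
  unfold pvT pvH
  refine Finset.sum_congr rfl ?_
  intro i hi
  have : cs.length - 2 - i = cs.length - 1 - 1 - i := by omega
  rw [this]

-- A's loop invariant.
theorem A_inv (root : Int) (cs : List Int) (p : Int) (hp : p ≠ 0) (k : Nat)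
    (hk : (k : Int) ≤ (cs.length : Int) - 1) :
    (PySem.List.pyRange 0 (k : Int) 1).foldl
      (fun diff coeff =>
        if PySem.List.pyGetD cs coeff 0 = 0 then diff
        else
          PySem.Int.mod
            (diff +
              PySem.Int.powMod root ((cs.length : Int) - coeff - 2).toNat p *
                  ((cs.length : Int) - coeff - 1) * PySem.List.pyGetD cs coeff 0) p)
      0 = PySem.Int.mod (pvT root cs k) p := by
  induction k with
  | zero =>
      rw [PySem.List.pyRange_one_eq_nil (by norm_num)]
      simp [pvT, pymod_zero]
  | succ k ih =>
      have hk' : (k : Int) ≤ (cs.length : Int) - 1 := by push_cast at hk ⊢; omega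
      have hsr : PySem.List.pyRange 0 ((k : Nat) + 1 : Int) 1 =
          PySem.List.pyRange 0 (k : Int) 1 ++ [(k : Int)] :=
        PySem.List.pyRange_one_succ_right (by positivity)
      rw [show (((k + 1 : Nat)) : Int) = (k : Int) + 1 by push_cast; ring, hsr,
        List.foldl_append, ih hk']
      simp only [List.foldl_cons, List.foldl_nil]
      have hget : PySem.List.pyGetD cs (k : Int) 0 = cs.getD k 0 :=
        PySem.List.pyGetD_natCast cs k 0
      have hkn : k + 1 ≤ cs.length - 1 := by omega
      by_cases hc : cs.getD k 0 = 0
      · rw [if_pos (by rw [hget]; exact hc)]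
        have : pvT root cs (k + 1) = pvT root cs k := by
          unfold pvT; rw [Finset.sum_range_succ, hc]; ring
        rw [this]
      · rw [if_neg (by rw [hget]; exact hc)]
        have hexp : ((cs.length : Int) - (k : Int) - 2).toNat = cs.length - 2 - k := by omega
        rw [hget, hexp, PySem.Int.powMod_eq]
        apply pymod_congr p _ _ hp
        have hT : pvT root cs (k + 1) =
            pvT root cs k + root ^ (cs.length - 2 - k) * ((cs.length : Int) - 1 - (k : Int)) * cs.getD k 0 := by
          unfold pvT; rw [Finset.sum_range_succ]
        rw [hT]
        have h1 : (PySem.Int.mod (pvT root cs k) p) % p = (pvT root cs k) % p := pymod_emod _ _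
        have h2 : (PySem.Int.mod (root ^ (cs.length - 2 - k)) p) % p =
            (root ^ (cs.length - 2 - k)) % p := pymod_emod _ _
        have hco : ((cs.length : Int) - (k : Int) - 1) = ((cs.length : Int) - 1 - (k : Int)) := by ring
        rw [hco]
        exact Int.ModEq.add h1 ((Int.ModEq.mul_right _ (Int.ModEq.mul_right _ h2)))

-- B's loop invariant over the first k elements of coefficients[:-1].
theorem B_inv (root : Int) (cs : List Int) (p : Int) (hp : p ≠ 0) (k : Nat)
    (hk : k ≤ cs.dropLast.length) :
    (cs.dropLast.take k).foldl
      (fun (s : Int × Int) c => (PySem.Int.mod (s.1 * root + s.2 * c) p, s.2 - 1))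
      (0, (cs.length : Int) - 1) =
      (PySem.Int.mod (pvH root cs k) p, (cs.length : Int) - 1 - (k : Int)) := by
  induction k with
  | zero => simp [pvH, pymod_zero]
  | succ k ih =>
      have hkl : k < cs.dropLast.length := by omega
      have hkc : k < cs.length := by
        rw [List.length_dropLast] at hkl; omega
      rw [List.take_add_one, List.getElem?_eq_getElem hkl, List.foldl_append, ih (by omega)]
      have hel : cs.dropLast[k] = cs.getD k 0 := by
        rw [List.getElem_dropLast, List.getD_eq_getElem cs 0 hkc]
      simp only [Option.toList_some, List.foldl_cons, List.foldl_nil, hel]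
      refine Prod.ext ?_ (by push_cast; ring)
      simp only
      rw [pvH_succ]
      apply pymod_congr p _ _ hp
      exact Int.ModEq.add (Int.ModEq.mul_right _ (pymod_emod _ _)) (Int.ModEq.refl _)

-- ===== VERDICT (by name: the statement is the Claim_ definition above) =====
theorem diff_poly_py_spec : Claim_equal_diff_poly_py := by
  intro root cs p _ hp
  unfold Spec_diff_poly_py diff_poly_py diff_poly_py_alt
  simp only [PySem.List.slice_to_neg_one]
  rcases Nat.eq_zero_or_pos cs.length with h0 | hpos
  · rw [List.length_eq_zero_iff.mp h0]
    rw [PySem.List.pyRange_one_eq_nil (by norm_num)]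
    simp
  · have hdl : cs.dropLast = cs.dropLast.take cs.dropLast.length := (List.take_length).symm
    rw [hdl, B_inv root cs p hp cs.dropLast.length le_rfl]
    have hlen : ((cs.length : Int) - 1) = ((cs.length - 1 : Nat) : Int) := by omega
    rw [hlen, A_inv root cs p hp (cs.length - 1) (by omega)]
    simp only [List.length_dropLast]
    rw [pvT_eq_pvH, pymod_idem _ _ hp]
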